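-- pv_equiv track=rewrite | github.com/davidlyu/SoftwareEngineering | TextQuery/main.py | query_word_in_list
-- ===== SOURCE A (Python) =====
-- def check_string(filename):
--     if not isinstance(filename, str):
--         raise TypeError('Type error: str')
--
-- def query_word_in_list(word_list, word):
--     """
--     query a word in a word list
--     :param word_list: list of string
--     :param word: string
--     :return: int, the sequence number of the word in the word list. start at 1
--     """
--     check_string(word)
--     occurrences = []
--     # for i, w in enumerate(word_list):
--     #     if word == w:
--     #         occurrences.append(i + 1)
--     # return occurrences
--     start = 0
--     try:
--         while True:
--             pos = word_list[start:].index(word) + 1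
--             occurrences.append(pos + start)
--             start += pos
--     except ValueError:
--         return occurrences
-- ===== SOURCE B (Python) =====
-- def query_word_in_list(word_list, word):
--     """
--     query a word in a word list
--     :param word_list: list of string
--     :param word: string
--     :return: list of int, the 1-based positions of the word in the word list
--     """
--     if not isinstance(word, str):
--         raise TypeError('Type error: str')
--     occurrences = []
--     for i, w in enumerate(word_list):
--         if w == word:
--             occurrences.append(i + 1)
--     return occurrences
-- ===== Notes on version B (the rewrite author's own statement) =====
-- stated objective: idiomatic
-- what changed: Replaced A's repeated slice-and-.index() rescans driven by a while-True/except-ValueError loop by a single enumerate pass that appends i+1 on each match.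
import Mathlib
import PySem

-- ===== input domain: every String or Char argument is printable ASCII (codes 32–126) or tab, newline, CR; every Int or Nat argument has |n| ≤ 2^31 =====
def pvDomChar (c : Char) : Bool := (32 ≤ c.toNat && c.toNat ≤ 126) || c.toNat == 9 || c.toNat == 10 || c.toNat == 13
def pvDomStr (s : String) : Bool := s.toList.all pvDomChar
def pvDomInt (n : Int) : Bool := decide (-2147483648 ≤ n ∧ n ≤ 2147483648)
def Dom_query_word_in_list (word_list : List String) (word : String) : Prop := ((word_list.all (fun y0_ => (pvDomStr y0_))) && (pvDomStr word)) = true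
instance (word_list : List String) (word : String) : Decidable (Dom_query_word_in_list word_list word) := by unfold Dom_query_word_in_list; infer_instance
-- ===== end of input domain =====

-- B replaces A's repeated slice-and-index rescans by a single enumerate pass (idiomatic).

-- ===== PORT A =====
-- A's while-True loop: pos = word_list[start:].index(word) + 1; append pos + start;
-- start += pos; the ValueError of .index (index? = none) ends the loop.
def queryLoopA (word_list : List String) (word : String) (start : Nat) (acc : List Int) :
    List Int :=
  match h : PySem.List.index? (PySem.List.slice word_list (some (start : Int)) none) word with
  | none => acc
  | some idx =>
    let pos : Nat := idx + 1
    queryLoopA word_list word (start + pos) (acc ++ [(pos : Int) + (start : Int)])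
termination_by word_list.length - start
decreasing_by
  have hk := (PySem.List.getElem_of_index?_eq_some h).1
  rw [PySem.List.slice_from_natCast] at hk
  simp [List.length_drop] at hk
  omega

def query_word_in_list (word_list : List String) (word : String) : List Int :=
  queryLoopA word_list word 0 []

-- ===== PORT B =====
-- Source B's 'for i, w in enumerate(word_list): if w == word: occurrences.append(i + 1)'
-- as structural recursion over the list carrying the running index i.
def queryLoopB (word_list : List String) (word : String) (i : Nat) : List Int :=
  match word_list with
  | [] => []
  | w :: rest =>
    if w = word then ((i : Int) + 1) :: queryLoopB rest word (i + 1)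
    else queryLoopB rest word (i + 1)

def query_word_in_list_alt (word_list : List String) (word : String) : List Int :=
  queryLoopB word_list word 0

-- ===== PRECONDITION & SPEC =====
def Spec_query_word_in_list (word_list : List String) (word : String) (out : List Int) : Prop := out = query_word_in_list_alt word_list word
instance (word_list : List String) (word : String) (out : List Int) : Decidable (Spec_query_word_in_list word_list word out) := by unfold Spec_query_word_in_list; infer_instance

-- ===== CLAIM (what is proved, stated in full; the proofs are below) =====
def Claim_equal_query_word_in_list : Prop := ∀ (word_list : List String) (word : String), Dom_query_word_in_list word_list word → Spec_query_word_in_list word_list word (query_word_in_list word_list word)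

-- ===== LEMMAS AND PROOFS =====

lemma queryLoopB_not_mem (word : String) (l : List String) (i : Nat) (h : word ∉ l) :
    queryLoopB l word i = [] := by
  induction l generalizing i with
  | nil => rfl
  | cons x t ih =>
    simp only [List.mem_cons, not_or] at h
    simp [queryLoopB, Ne.symm h.1, ih _ h.2]

lemma queryLoopB_split (word : String) (pre suf : List String) (i : Nat) (hpre : word ∉ pre) :
    queryLoopB (pre ++ word :: suf) word i =
      ((i : Int) + pre.length + 1) :: queryLoopB suf word (i + pre.length + 1) := by
  induction pre generalizing i with
  | nil => simp [queryLoopB]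
  | cons x t ih =>
    simp only [List.mem_cons, not_or] at hpre
    have := ih (i + 1) hpre.2
    simp [queryLoopB, Ne.symm hpre.1, this]
    constructor
    · push_cast; ring
    · ring_nf

lemma queryLoopA_eq (word_list : List String) (word : String) (start : Nat) (acc : List Int) :
    queryLoopA word_list word start acc =
      acc ++ queryLoopB (word_list.drop start) word start := by
  induction start, acc using queryLoopA.induct word_list word with
  | case1 start acc h =>
    rw [queryLoopA]
    split
    · rw [PySem.List.slice_from_natCast, PySem.List.index?_eq_none_iff] at h
      simp [queryLoopB_not_mem word _ start h]
    · next _ heq =>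
      rw [PySem.List.slice_from_natCast, PySem.List.index?_eq_idxOf?] at h
      rw [PySem.List.slice_from_natCast, PySem.List.index?_eq_idxOf?] at heq
      rw [h] at heq; cases heq
  | case2 start acc idx h pos ih =>
    rw [queryLoopA]
    split
    · next heq =>
      rw [PySem.List.slice_from_natCast, PySem.List.index?_eq_idxOf?] at h
      rw [PySem.List.slice_from_natCast, PySem.List.index?_eq_idxOf?] at heq
      rw [h] at heq; cases heq
    · next idx' heq =>
      rw [PySem.List.slice_from_natCast, PySem.List.index?_eq_idxOf?] at h
      rw [PySem.List.slice_from_natCast, PySem.List.index?_eq_idxOf?] at heq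
      rw [h] at heq
      obtain rfl : idx = idx' := Option.some.inj heq
      have h' := h
      rw [← PySem.List.index?_eq_idxOf?, PySem.List.index?_eq_some_iff] at h'
      obtain ⟨pre, suf, hsplit, hlen, hnot⟩ := h'
      have hdropS : word_list.drop (start + (idx + 1)) = suf := by
        rw [← List.drop_drop, hsplit]
        have hcons : pre ++ word :: suf = (pre ++ [word]) ++ suf := by simp
        rw [hcons, ← hlen]
        simpa using List.drop_left (pre ++ [word]) suf
      rw [ih, hdropS, hsplit, queryLoopB_split word pre suf start hnot, hlen]
      simp only [List.append_assoc, List.singleton_append]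
      congr 2
      show ((idx + 1 : Nat) : Int) + (start : Int) = (start : Int) + (idx : Int) + 1
      push_cast; ring

-- ===== VERDICT (by name: the statement is the Claim_ definition above) =====
theorem query_word_in_list_spec : Claim_equal_query_word_in_list := by
  intro wl w _
  unfold Spec_query_word_in_list query_word_in_list query_word_in_list_alt
  simpa using queryLoopA_eq wl w 0 []
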